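-- pv_equiv track=rewrite | github.com/dqgthb/algorithms | programmers/learn-courses-30-lessons-64062/main.py | ccz
-- ===== SOURCE A (Python) =====
-- def ccz(stones, people):
--     stones = [stone - people for stone in stones]
--
--     maxCount = 0
--     count = 0
--     for stone in stones:
--         if stone <= 0:
--             count += 1
--             maxCount = max(maxCount, count)
--         else:
--             count = 0
--     return maxCount
-- ===== SOURCE B (Python) =====
-- from itertools import groupby
--
--
-- def ccz(stones, people):
--     return max(
--         (sum(1 for _ in g) for ok, g in groupby(s <= people for s in stones) if ok),
--         default=0,
--     )
-- ===== Notes on version B (the rewrite author's own statement) =====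
-- stated objective: idiomatic
-- what changed: Replaced the manual running-counter/max-tracking loop with itertools.groupby: split the s<=people predicate sequence into maximal runs and take the max length of the True runs (default 0).
import Mathlib
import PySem

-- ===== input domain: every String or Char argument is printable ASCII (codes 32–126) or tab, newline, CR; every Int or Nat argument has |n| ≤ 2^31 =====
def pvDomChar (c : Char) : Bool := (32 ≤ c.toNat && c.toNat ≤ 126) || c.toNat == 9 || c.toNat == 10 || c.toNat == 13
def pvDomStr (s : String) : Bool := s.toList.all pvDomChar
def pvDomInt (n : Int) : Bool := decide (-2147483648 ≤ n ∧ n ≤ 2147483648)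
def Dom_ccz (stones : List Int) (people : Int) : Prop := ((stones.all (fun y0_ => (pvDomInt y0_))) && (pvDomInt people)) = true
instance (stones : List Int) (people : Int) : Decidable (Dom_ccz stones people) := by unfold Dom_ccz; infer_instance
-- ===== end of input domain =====

-- B replaces A's running-counter/max loop with a groupby-style run split: max length of True runs (idiomatic, same O(n) cost).


-- ===== PORT A =====
-- A's for-loop over the shifted stones, carrying (count, maxCount)
def cczLoop : List Int → Int → Int → Int
  | [], _, mc => mc
  | s :: t, c, mc => if s ≤ 0 then cczLoop t (c + 1) (max mc (c + 1)) else cczLoop t 0 mc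

def ccz (stones : List Int) (people : Int) : Int :=
  cczLoop (stones.map (fun stone => stone - people)) 0 0

-- ===== PORT B =====
-- itertools.groupby over a Bool sequence: maximal runs of equal values, in order
def cczRuns : List Bool → List (Bool × Int)
  | [] => []
  | b :: t =>
    match cczRuns t with
    | (b', n) :: r => if b = b' then (b, n + 1) :: r else (b, 1) :: (b', n) :: r
    | [] => [(b, 1)]

-- max(lengths of True runs, default=0)
def ccz_alt (stones : List Int) (people : Int) : Int :=
  (cczRuns (stones.map (fun s => decide (s ≤ people)))).foldl
    (fun m kn => if kn.1 then max m kn.2 else m) 0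

-- ===== PRECONDITION & SPEC =====
def Spec_ccz (stones : List Int) (people : Int) (out : Int) : Prop := out = ccz_alt stones people
instance (stones : List Int) (people : Int) (out : Int) : Decidable (Spec_ccz stones people out) := by unfold Spec_ccz; infer_instance

-- ===== CLAIM (what is proved, stated in full; the proofs are below) =====
def Claim_equal_ccz : Prop := ∀ (stones : List Int) (people : Int), Dom_ccz stones people → Spec_ccz stones people (ccz stones people)

-- ===== LEMMAS AND PROOFS =====

-- best streak of `true`s starting from a running count c (right-recursive view of A's loop)
def cczBF : List Bool → Int → Int
  | [], _ => 0
  | b :: t, c => if b then max (c + 1) (cczBF t (c + 1)) else cczBF t 0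

-- foldr form of B's max-of-true-run-lengths
def cczMfr : List (Bool × Int) → Int
  | [] => 0
  | (k, n) :: r => if k then max n (cczMfr r) else cczMfr r

theorem cczMfr_nonneg (l : List (Bool × Int)) : 0 ≤ cczMfr l := by
  induction l with
  | nil => simp [cczMfr]
  | cons x r ih => obtain ⟨k, n⟩ := x; simp only [cczMfr]; split <;> omega

theorem cczLoop_eq_bf (s : List Int) (c mc : Int) (hmc : 0 ≤ mc) :
    cczLoop s c mc = max mc (cczBF (s.map (fun x => decide (x ≤ 0))) c) := by
  induction s generalizing c mc with
  | nil => simp [cczLoop, cczBF]; omega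
  | cons x t ih =>
    simp only [cczLoop, List.map_cons, cczBF]
    by_cases h : x ≤ 0
    · simp only [h, if_true, decide_eq_true_eq]
      rw [ih (c + 1) (max mc (c + 1)) (by omega)]
      omega
    · simp only [h, if_false, decide_eq_true_eq]
      rw [ih 0 mc hmc]

theorem cczRuns_head_pos (bs : List Bool) (b : Bool) (n : Int) (r : List (Bool × Int))
    (h : cczRuns bs = (b, n) :: r) : 1 ≤ n := by
  induction bs generalizing b n r with
  | nil => simp [cczRuns] at h
  | cons x t ih =>
    simp only [cczRuns] at h
    cases hr : cczRuns t with
    | nil => rw [hr] at h; simp at h; omega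
    | cons p r' =>
      obtain ⟨b', n'⟩ := p
      rw [hr] at h
      by_cases hx : x = b'
      · simp [hx] at h; have := ih b' n' r' hr; omega
      · simp [hx] at h; omega

-- value of the best streak when the pending run already has count c
def cczHead (l : List (Bool × Int)) (c : Int) : Int :=
  match l with
  | (true, n) :: r => max (c + n) (cczMfr r)
  | l => cczMfr l

theorem cczBF_eq_runs (bs : List Bool) (c : Int) (hc : 0 ≤ c) :
    cczBF bs c = cczHead (cczRuns bs) c := by
  induction bs generalizing c with
  | nil => simp [cczBF, cczRuns, cczMfr, cczHead]
  | cons b t ih =>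
    cases b with
    | false =>
      simp only [cczBF, if_false, Bool.false_eq_true]
      rw [ih 0 le_rfl]
      simp only [cczRuns]
      cases hr : cczRuns t with
      | nil => simp [cczMfr, cczHead]
      | cons p r =>
        obtain ⟨b', n'⟩ := p
        cases b' with
        | false => simp [cczMfr, cczHead]
        | true =>
          have hn : 1 ≤ n' := cczRuns_head_pos t true n' r hr
          simp only [cczMfr, cczHead, if_true, Bool.false_eq_true, if_false]
          have := cczMfr_nonneg r
          omega
    | true =>
      simp only [cczBF, if_true]
      rw [ih (c + 1) (by omega)]
      simp only [cczRuns]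
      cases hr : cczRuns t with
      | nil => simp [cczMfr, cczHead]
      | cons p r =>
        obtain ⟨b', n'⟩ := p
        cases b' with
        | false =>
          simp only [Bool.true_eq_false, if_false, cczMfr, cczHead]
        | true =>
          have hn : 1 ≤ n' := cczRuns_head_pos t true n' r hr
          simp only [if_true, cczHead]
          have := cczMfr_nonneg r
          omega

theorem cczFoldl_eq_mfr (l : List (Bool × Int)) (a : Int) (ha : 0 ≤ a) :
    l.foldl (fun m kn => if kn.1 then max m kn.2 else m) a = max a (cczMfr l) := by
  induction l generalizing a with
  | nil => simp [cczMfr]; omega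
  | cons x r ih =>
    obtain ⟨k, n⟩ := x
    cases k with
    | false => simp only [List.foldl, cczMfr, Bool.false_eq_true, if_false]; exact ih a ha
    | true =>
      simp only [List.foldl, cczMfr, if_true]
      rw [ih (max a n) (by omega)]
      omega

theorem cczMap_shift (stones : List Int) (people : Int) :
    (stones.map (fun stone => stone - people)).map (fun x => decide (x ≤ 0))
      = stones.map (fun s => decide (s ≤ people)) := by
  rw [List.map_map]
  apply List.map_congr_left
  intro s _
  simp only [Function.comp, decide_eq_decide]
  omega

-- ===== VERDICT (by name: the statement is the Claim_ definition above) =====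
theorem ccz_spec : Claim_equal_ccz := by
  intro stones people _
  unfold Spec_ccz ccz ccz_alt
  rw [cczLoop_eq_bf _ 0 0 le_rfl, cczMap_shift]
  rw [cczBF_eq_runs _ 0 le_rfl]
  rw [cczFoldl_eq_mfr _ 0 le_rfl]
  cases hr : cczRuns (stones.map (fun s => decide (s ≤ people))) with
  | nil => simp [cczMfr, cczHead]
  | cons p r =>
    obtain ⟨k, n⟩ := p
    cases k with
    | false => simp [cczMfr, cczHead]
    | true =>
      have hn : 1 ≤ n := cczRuns_head_pos _ true n r hr
      have := cczMfr_nonneg r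
      simp only [cczMfr, cczHead, if_true]
      omega
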